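-- pv_equiv track=rewrite | github.com/perfectlyodd/spoj-python | palindrome-submission.py | add_one_to_string
-- ===== SOURCE A (Python) =====
-- def add_one_to_string(string_number, length):
--     if length == 0:
--         return '1'
--     position = 1
--     carry = True
--     while carry:
--         char = string_number[length - position]
--         if position > length:
--             string_number = '1' + string_number
--             carry = False
--         elif '0' <= char and char <= '8':
--             carry = False
--             string_number = string_number[:length - position:] + chr(ord(char) + 1) + string_number[length - position + 1::]
--         else:
--             string_number = string_number[:length - position:] + '0' + string_number[length - position + 1::]
--             position += 1
--     return string_number
-- ===== SOURCE B (Python) =====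
-- def add_one_to_string(string_number, length):
--     if length == 0:
--         return '1'
--     i = length - 1
--     while i >= 0 and not ('0' <= string_number[i] <= '8'):
--         i -= 1
--     if i < 0:
--         return '1' + '0' * length + string_number[length:]
--     return (string_number[:i]
--             + chr(ord(string_number[i]) + 1)
--             + '0' * (length - 1 - i)
--             + string_number[length:])
-- ===== Notes on version B (the rewrite author's own statement) =====
-- stated objective: faster
-- what changed: A rebuilds the whole string with slicing on every carry step (quadratic in the run of trailing nines); B does one right-to-left scan to the first incrementable character and assembles the result string once.
-- outside the precondition, e.g. on add_one_to_string('ab', -1): A returns '1ab', B returns '1b'; on add_one_to_string('', 1): A raises IndexError, B raises IndexError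
import Mathlib
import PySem

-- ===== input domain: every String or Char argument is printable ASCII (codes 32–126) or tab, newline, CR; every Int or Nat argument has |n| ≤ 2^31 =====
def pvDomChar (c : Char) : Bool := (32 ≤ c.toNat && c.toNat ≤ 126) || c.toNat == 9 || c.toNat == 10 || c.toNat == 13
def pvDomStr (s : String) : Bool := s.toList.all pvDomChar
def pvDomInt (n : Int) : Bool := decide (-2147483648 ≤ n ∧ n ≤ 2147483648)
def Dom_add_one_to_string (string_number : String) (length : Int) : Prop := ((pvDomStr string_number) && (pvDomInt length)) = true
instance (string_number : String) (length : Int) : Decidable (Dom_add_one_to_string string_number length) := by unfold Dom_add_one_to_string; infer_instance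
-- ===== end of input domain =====

-- B replaces A's repeated quadratic string rebuilding with one right-to-left scan for the first
-- incrementable char and a single construction of the result (objective: faster, asymptotic).


-- ===== PORT A =====
-- The while loop of A, on the char list; fuel counts loop iterations (the loop runs at most
-- length+1 times inside Pre_); the fuel-0 / index-error fallbacks are unreachable inside Pre_.
def pvALoop : Nat → List Char → Int → Int → List Char
  | 0, s, _, _ => s
  | fuel+1, s, L, p =>
    match PySem.List.pyGet? s (L - p) with
    | none => s  -- Python raises IndexError here; outside Pre_
    | some c =>
      if p > L then '1' :: s
      else if '0' ≤ c ∧ c ≤ '8' then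
        PySem.List.slice s none (some (L - p)) ++
          Char.ofNat (c.toNat + 1) :: PySem.List.slice s (some (L - p + 1)) none
      else
        pvALoop fuel
          (PySem.List.slice s none (some (L - p)) ++
            '0' :: PySem.List.slice s (some (L - p + 1)) none) L (p + 1)

def add_one_to_string (string_number : String) (length : Int) : String :=
  if length = 0 then "1"
  else String.ofList (pvALoop (length.toNat + 1) string_number.toList length 1)

-- ===== PORT B =====
-- B's while loop 'i = length-1; while i >= 0 and not ('0' <= s[i] <= '8'): i -= 1',
-- written on the index+1 so it is structural; returns none when i went below 0.
def pvBScan (s : List Char) : Nat → Option Nat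
  | 0 => none
  | k+1 =>
    match s[k]? with
    | none => some k  -- Python raises IndexError here; outside Pre_
    | some c => if '0' ≤ c ∧ c ≤ '8' then some k else pvBScan s k

-- slices s[:i] and s[L:] have nonnegative bounds here, so take/drop/slice_from are exact
def add_one_to_string_alt (string_number : String) (length : Int) : String :=
  if length = 0 then "1"
  else
    match pvBScan string_number.toList length.toNat with
    | none => String.ofList ('1' :: List.replicate length.toNat '0' ++
        PySem.List.slice string_number.toList (some length) none)
    | some i => String.ofList (string_number.toList.take i ++
        Char.ofNat ((string_number.toList.getD i ' ').toNat + 1) ::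
          List.replicate (length - 1 - (i : Int)).toNat '0' ++
            PySem.List.slice string_number.toList (some length) none)

-- ===== PRECONDITION & SPEC =====
-- Pre_ is the natural domain: length counts the digits to increment, 0 ≤ length ≤ len(s).
-- A raises IndexError for length > len(s) or length ≤ -len(s); A also happens to return
-- '1'+s for small negative lengths — an out-of-domain accident, excluded here (see cites).
def Pre_add_one_to_string (string_number : String) (length : Int) : Prop :=
  0 ≤ length ∧ length ≤ string_number.toList.length
instance (string_number : String) (length : Int) : Decidable (Pre_add_one_to_string string_number length) := by unfold Pre_add_one_to_string; infer_instance
def pvWitness_add_one_to_string : String × Int := ("129", 3)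

def Spec_add_one_to_string (string_number : String) (length : Int) (out : String) : Prop := out = add_one_to_string_alt string_number length
instance (string_number : String) (length : Int) (out : String) : Decidable (Spec_add_one_to_string string_number length out) := by unfold Spec_add_one_to_string; infer_instance

-- ===== CLAIM (what is proved, stated in full; the proofs are below) =====
def Claim_equal_add_one_to_string : Prop := ∀ (string_number : String) (length : Int), Dom_add_one_to_string string_number length → Pre_add_one_to_string string_number length → Spec_add_one_to_string string_number length (add_one_to_string string_number length)

-- ===== LEMMAS AND PROOFS =====

theorem pvBScan_lt {s : List Char} {m i : Nat} (h : pvBScan s m = some i) : i < m := by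
  induction m with
  | zero => simp [pvBScan] at h
  | succ k ih =>
    unfold pvBScan at h
    cases hg : s[k]? with
    | none => rw [hg] at h; simp_all
    | some c =>
      rw [hg] at h
      by_cases hc : '0' ≤ c ∧ c ≤ '8'
      · simp [hc] at h; omega
      · simp [hc] at h; have := ih h; omega

theorem pvBScan_set {s : List Char} {k : Nat} (x : Char) {m : Nat} (hm : m ≤ k) :
    pvBScan (s.set k x) m = pvBScan s m := by
  induction m with
  | zero => rfl
  | succ j ih =>
    unfold pvBScan
    rw [List.getElem?_set_ne (by omega)]
    cases s[j]? with
    | none => rfl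
    | some c =>
      by_cases hc : '0' ≤ c ∧ c ≤ '8'
      · simp [hc]
      · simp [hc]; exact ih (by omega)

theorem pvALoop_eq (k : Nat) : ∀ (fuel : Nat) (cs : List Char) (L : Int),
    (k : Int) < L → L ≤ cs.length → k + 2 ≤ fuel →
    pvALoop fuel cs L (L - k) =
      match pvBScan cs (k+1) with
      | none => '1' :: List.replicate (k+1) '0' ++ cs.drop (k+1)
      | some i => cs.take i ++
          Char.ofNat ((cs.getD i ' ').toNat + 1) :: List.replicate (k - i) '0' ++ cs.drop (k+1) := by
  induction k with
  | zero =>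
    intro fuel cs L hkL hL hf
    obtain ⟨f, rfl⟩ : ∃ f, fuel = f + 1 + 1 := ⟨fuel - 2, by omega⟩
    have hlen : 0 < cs.length := by omega
    unfold pvALoop
    rw [show L - (L - ((0:Nat):Int)) = ((0:Nat):Int) from by omega]
    rw [PySem.List.pyGet?_natCast, List.getElem?_eq_getElem hlen]
    simp only []
    rw [if_neg (show ¬ (L - ((0:Nat):Int) > L) from by omega)]
    rw [show ((0:Nat):Int) + 1 = ((1:Nat):Int) from by omega]
    rw [PySem.List.slice_to_natCast, PySem.List.slice_from_natCast]
    by_cases hc : '0' ≤ cs[0] ∧ cs[0] ≤ '8'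
    · rw [if_pos hc]
      simp [pvBScan, List.getElem?_eq_getElem hlen, hc, List.getD]
    · rw [if_neg hc]
      unfold pvALoop
      rw [show L - (L - ((0:Nat):Int) + 1) = (-1 : Int) from by omega]
      rw [PySem.List.pyGet?_neg_one]
      cases hg : (List.take 0 cs ++ '0' :: List.drop 1 cs).getLast? with
      | none => simp at hg
      | some c =>
        simp only []
        rw [if_pos (show L - ((0:Nat):Int) + 1 > L from by omega)]
        simp [pvBScan, List.getElem?_eq_getElem hlen, hc]
  | succ k ih =>
    intro fuel cs L hkL hL hf
    obtain ⟨f, rfl⟩ : ∃ f, fuel = f + 1 := ⟨fuel - 1, by omega⟩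
    have hklen : k + 1 < cs.length := by omega
    unfold pvALoop
    rw [show L - (L - ((k+1:Nat):Int)) = ((k+1:Nat):Int) from by omega]
    rw [PySem.List.pyGet?_natCast, List.getElem?_eq_getElem hklen]
    simp only []
    rw [if_neg (show ¬ (L - ((k+1:Nat):Int) > L) from by omega)]
    rw [show ((k+1:Nat):Int) + 1 = ((k+2:Nat):Int) from by omega]
    rw [PySem.List.slice_to_natCast, PySem.List.slice_from_natCast]
    by_cases hc : '0' ≤ cs[k+1] ∧ cs[k+1] ≤ '8'
    · rw [if_pos hc]
      have hscan : pvBScan cs (k+1+1) = some (k+1) := by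
        rw [pvBScan, List.getElem?_eq_getElem hklen]
        simp [hc]
      rw [hscan]
      simp [List.getD, List.getElem?_eq_getElem hklen]
    · rw [if_neg hc]
      have hset : List.take (k+1) cs ++ '0' :: List.drop (k+2) cs = cs.set (k+1) '0' :=
        Eq.symm (List.set_eq_take_cons_drop '0' hklen)
      rw [hset]
      rw [show L - ((k+1:Nat):Int) + 1 = L - ((k:Nat):Int) from by omega]
      rw [ih f (cs.set (k+1) '0') L (by omega) (by simp; omega) (by omega)]
      have hscan : pvBScan cs (k+1+1) = pvBScan cs (k+1) := by
        rw [pvBScan, List.getElem?_eq_getElem hklen]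
        simp [hc]
      rw [pvBScan_set '0' (le_refl (k+1)), hscan]
      have hdrop : (cs.set (k+1) '0').drop (k+1) = '0' :: cs.drop (k+2) := by
        rw [List.set_eq_take_cons_drop '0' hklen,
            List.drop_append_of_le_length (by simp; omega)]
        simp
      cases hbs : pvBScan cs (k+1) with
      | none =>
        simp only []
        rw [hdrop]
        simp [List.replicate_succ']
      | some i =>
        have hik : i < k + 1 := pvBScan_lt hbs
        simp only []
        rw [hdrop, List.take_set_of_le (by omega)]
        have hgd : (cs.set (k+1) '0').getD i ' ' = cs.getD i ' ' := by
          simp [List.getD, List.getElem?_set_ne (show k+1 ≠ i from by omega)]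
        rw [hgd]
        rw [show k + 1 - i = (k - i) + 1 from by omega, List.replicate_succ']
        simp

-- ===== VERDICT (by name: the statement is the Claim_ definition above) =====
theorem add_one_to_string_spec : Claim_equal_add_one_to_string := by
  intro s L hdom hpre
  obtain ⟨hL0, hLlen⟩ := hpre
  unfold Spec_add_one_to_string add_one_to_string add_one_to_string_alt
  by_cases h0 : L = 0
  · simp [h0]
  · simp only [h0, if_false]
    have hL1 : 1 ≤ L := by omega
    have hmain := pvALoop_eq (L.toNat - 1) (L.toNat + 1) s.toList L (by omega) hLlen (by omega)
    rw [show L - ((L.toNat - 1 : Nat) : Int) = 1 from by omega] at hmain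
    rw [hmain]
    have hsz : L.toNat - 1 + 1 = L.toNat := by omega
    rw [hsz]
    rw [PySem.List.slice_from s.toList hL0]
    cases hbs : pvBScan s.toList L.toNat with
    | none => simp
    | some i =>
      have hik : i < L.toNat := pvBScan_lt hbs
      simp only []
      rw [show (L - 1 - (i:Int)).toNat = L.toNat - 1 - i from by omega]
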